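-- pv_equiv track=rewrite | github.com/wwicak/eguard-agent | threat-intel/processing/update_attack_critical_regression_history.py | _consecutive_passes
-- ===== SOURCE A (Python) =====
-- from typing import Any
--
-- def _consecutive_passes(rows: list[dict[str, Any]]) -> int:
--     streak = 0
--     for row in reversed(rows):
--         if str(row.get("status", "")).lower() == "pass":
--             streak += 1
--             continue
--         break
--     return streak
-- ===== SOURCE B (Python) =====
-- def _consecutive_passes(rows: list) -> int:
--     streak = 0
--     for row in rows:
--         if str(row.get("status", "")).lower() == "pass":
--             streak += 1
--         else:
--             streak = 0
--     return streak
-- ===== Notes on version B (the rewrite author's own statement) =====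
-- stated objective: alternative
-- what changed: Single forward pass with reset-to-zero on any non-pass row (no reversal, no early break) instead of A's backward scan that breaks at the first non-pass.
import Mathlib
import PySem

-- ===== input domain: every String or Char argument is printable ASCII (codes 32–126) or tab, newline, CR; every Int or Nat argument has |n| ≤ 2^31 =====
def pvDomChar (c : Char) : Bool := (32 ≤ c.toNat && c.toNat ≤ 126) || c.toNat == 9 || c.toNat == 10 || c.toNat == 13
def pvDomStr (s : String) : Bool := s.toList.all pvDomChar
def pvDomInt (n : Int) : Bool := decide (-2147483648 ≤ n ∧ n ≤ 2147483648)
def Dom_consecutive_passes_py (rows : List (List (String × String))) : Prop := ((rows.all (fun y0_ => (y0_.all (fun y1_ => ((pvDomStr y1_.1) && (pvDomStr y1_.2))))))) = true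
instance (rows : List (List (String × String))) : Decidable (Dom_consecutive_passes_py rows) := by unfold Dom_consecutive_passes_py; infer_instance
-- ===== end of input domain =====

-- B replaces A's backward scan with break by a single forward pass that resets the streak on any non-pass row.
-- ===== PORT A =====
def pvIsPass (row : List (String × String)) : Bool :=
  PySem.Str.lower (((row.find? (fun kv => kv.1 == "status")).map Prod.snd).getD "") == "pass"

-- A's loop over reversed(rows): streak accumulator, break on first non-pass
def pvALoop (streak : Int) : List (List (String × String)) → Int
  | [] => streak
  | row :: rest => if pvIsPass row then pvALoop (streak + 1) rest else streak

def consecutive_passes_py (rows : List (List (String × String))) : Int :=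
  pvALoop 0 rows.reverse

-- ===== PORT B =====
def consecutive_passes_py_alt (rows : List (List (String × String))) : Int :=
  rows.foldl (fun streak row => if pvIsPass row then streak + 1 else 0) 0

-- ===== PRECONDITION & SPEC =====
def Spec_consecutive_passes_py (rows : List (List (String × String))) (out : Int) : Prop := out = consecutive_passes_py_alt rows
instance (rows : List (List (String × String))) (out : Int) : Decidable (Spec_consecutive_passes_py rows out) := by unfold Spec_consecutive_passes_py; infer_instance

-- ===== CLAIM (what is proved, stated in full; the proofs are below) =====
def Claim_equal_consecutive_passes_py : Prop := ∀ (rows : List (List (String × String))), Dom_consecutive_passes_py rows → Spec_consecutive_passes_py rows (consecutive_passes_py rows)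

-- ===== LEMMAS AND PROOFS =====

lemma pvALoop_shift (l : List (List (String × String))) (s : Int) :
    pvALoop s l = s + pvALoop 0 l := by
  induction l generalizing s with
  | nil => simp [pvALoop]
  | cons r t ih =>
    simp only [pvALoop]
    by_cases h : pvIsPass r = true
    · rw [if_pos h, if_pos h, ih (s+1), ih (0+1)]; ring
    · rw [if_neg h, if_neg h]; ring_nf

lemma pvFold_eq_aloop (rows : List (List (String × String))) :
    rows.foldl (fun streak row => if pvIsPass row then streak + 1 else 0) 0
      = pvALoop 0 rows.reverse := by
  induction rows using List.reverseRecOn with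
  | nil => simp [pvALoop]
  | append_singleton l r ih =>
    rw [List.foldl_append, List.reverse_append]
    simp only [List.foldl_cons, List.foldl_nil, List.reverse_singleton,
      List.singleton_append, pvALoop]
    by_cases h : pvIsPass r = true
    · rw [if_pos h, if_pos h, pvALoop_shift, ih]; ring
    · rw [if_neg h, if_neg h]

-- ===== VERDICT (by name: the statement is the Claim_ definition above) =====
theorem consecutive_passes_py_spec : Claim_equal_consecutive_passes_py := by
  intro rows _
  unfold Spec_consecutive_passes_py consecutive_passes_py consecutive_passes_py_alt
  exact (pvFold_eq_aloop rows).symm
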